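-- pv_equiv track=rewrite | github.com/Ivy643-wifi/AutoCAD-CAE | autocae_pipeline/src/autocae/backend/services/solver_service.py | _parse_elem_nodes
-- ===== SOURCE A (Python) =====
-- def _parse_elem_nodes(lines: list[str]) -> dict[int, list[int]]:
--     """从 .inp 行列表中解析 *ELEMENT 块，返回 element_id → node_ids 映射。"""
--     elem_nodes: dict[int, list[int]] = {}
--     i = 0
--     while i < len(lines):
--         line = lines[i].strip()
--         if line.upper().startswith("*ELEMENT"):
--             i += 1
--             while i < len(lines) and not lines[i].strip().startswith("*"):
--                 parts = lines[i].strip().rstrip(",").split(",")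
--                 try:
--                     parts_int = [int(p.strip()) for p in parts if p.strip()]
--                     if parts_int:
--                         eid = parts_int[0]
--                         elem_nodes[eid] = parts_int[1:]
--                 except ValueError:
--                     pass
--                 i += 1
--             continue
--         i += 1
--     return elem_nodes
-- ===== SOURCE B (Python) =====
-- def _line_ints(s: str) -> list[int]:
--     """Parse the integers of one data line; [] if a field is not an int."""
--     vals = []
--     for p in s.rstrip(",").split(","):
--         q = p.strip()
--         if not q:
--             continue
--         try:
--             vals.append(int(q))
--         except ValueError:
--             return []
--     return vals
--
--
-- def _parse_elem_nodes(lines: list[str]) -> dict[int, list[int]]: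
--     elem_nodes: dict[int, list[int]] = {}
--     in_elem = False
--     for line in lines:
--         s = line.strip()
--         if s.upper().startswith("*ELEMENT"):
--             in_elem = True
--         elif s.startswith("*"):
--             in_elem = False
--         elif in_elem:
--             vals = _line_ints(s)
--             if vals:
--                 elem_nodes[vals[0]] = vals[1:]
--     return elem_nodes
-- ===== Notes on version B (the rewrite author's own statement) =====
-- stated objective: simpler
-- what changed: Replaces A's explicit-index outer/inner while loops with a single flat for-loop over the lines carrying an in_elem flag, and replaces the try/except list comprehension by an early-returning accumulator loop for the per-line integer parse.
import Mathlib
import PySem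

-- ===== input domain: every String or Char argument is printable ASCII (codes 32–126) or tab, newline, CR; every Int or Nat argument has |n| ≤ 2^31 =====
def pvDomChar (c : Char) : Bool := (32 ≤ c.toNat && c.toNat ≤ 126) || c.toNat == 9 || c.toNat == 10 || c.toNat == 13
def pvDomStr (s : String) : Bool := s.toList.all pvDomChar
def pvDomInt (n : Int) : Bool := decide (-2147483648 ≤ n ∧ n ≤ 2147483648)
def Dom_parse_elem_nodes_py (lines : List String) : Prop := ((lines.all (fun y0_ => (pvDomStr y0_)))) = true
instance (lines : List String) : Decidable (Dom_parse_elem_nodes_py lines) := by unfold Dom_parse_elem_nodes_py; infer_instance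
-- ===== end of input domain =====

-- B replaces A's explicit-index nested-while scan by one flat pass with an in_elem flag
-- and an early-returning per-line integer parser (objective: simpler decomposition, same cost).

-- shared primitive: exact port of Python str.rstrip(",") (drop trailing ',' characters)
def pvRstripComma (s : String) : String :=
  String.ofList (((s.toList.reverse.dropWhile (fun c => c == ','))).reverse)

-- shared primitive: s.split(",") — sep is the nonempty literal ",", so split? never returns none
def pvSplitComma (s : String) : List String :=
  (PySem.Str.split? s ",").getD []

-- ===== PORT A =====
-- one data line of A: parts = line.strip().rstrip(",").split(","); try-comprehension; dict update
def pA_line (d : PySem.Dict Int (List Int)) (l : String) : PySem.Dict Int (List Int) :=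
  let parts := pvSplitComma (pvRstripComma (PySem.Str.strip l))
  match (parts.filter (fun p => PySem.Str.strip p != "")).mapM
        (fun p => PySem.Int.ofStr? (PySem.Str.strip p)) with
  | none => d                      -- ValueError: whole line skipped
  | some [] => d                   -- parts_int empty
  | some (eid :: ns) => d.insert eid ns

-- A's inner while: consume data lines until a line whose strip startswith "*" (or end);
-- returns the updated dict and the remaining lines (the terminator included)
def pA_inner (d : PySem.Dict Int (List Int)) :
    List String → PySem.Dict Int (List Int) × List String
  | [] => (d, [])
  | l :: rest =>
    if PySem.Str.startswith (PySem.Str.strip l) "*" then (d, l :: rest)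
    else pA_inner (pA_line d l) rest

theorem pA_inner_length (d : PySem.Dict Int (List Int)) (ls : List String) :
    (pA_inner d ls).2.length ≤ ls.length := by
  induction ls generalizing d with
  | nil => simp [pA_inner]
  | cons l rest ih =>
    simp only [pA_inner]
    split
    · simp
    · exact le_trans (ih _) (Nat.le_succ _)

-- A's outer while over the index i, as recursion on the remaining lines
def pA_go (d : PySem.Dict Int (List Int)) : List String → PySem.Dict Int (List Int)
  | [] => d
  | l :: rest =>
    if PySem.Str.startswith (PySem.Str.upper (PySem.Str.strip l)) "*ELEMENT" then
      pA_go (pA_inner d rest).1 (pA_inner d rest).2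
    else
      pA_go d rest
termination_by ls => ls.length
decreasing_by
  · exact Nat.lt_succ_of_le (pA_inner_length d rest)
  · simp

def parse_elem_nodes_py (lines : List String) : List (Int × List Int) :=
  (pA_go PySem.Dict.empty lines).items

-- ===== PORT B =====
-- B's per-line parser: explicit loop with accumulator, early return [] on a bad field
def pB_vals (acc : List Int) : List String → List Int
  | [] => acc
  | p :: ps =>
    let q := PySem.Str.strip p
    if q == "" then pB_vals acc ps
    else
      match PySem.Int.ofStr? q with
      | none => []                 -- ValueError: return []
      | some n => pB_vals (acc ++ [n]) ps

def pB_line (d : PySem.Dict Int (List Int)) (s : String) : PySem.Dict Int (List Int) :=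
  match pB_vals [] (pvSplitComma (pvRstripComma s)) with
  | [] => d
  | eid :: ns => d.insert eid ns

-- B's single flat pass with the in_elem flag
def pB_go (d : PySem.Dict Int (List Int)) (inElem : Bool) :
    List String → PySem.Dict Int (List Int)
  | [] => d
  | l :: rest =>
    let s := PySem.Str.strip l
    if PySem.Str.startswith (PySem.Str.upper s) "*ELEMENT" then
      pB_go d true rest
    else if PySem.Str.startswith s "*" then
      pB_go d false rest
    else
      pB_go (if inElem then pB_line d s else d) inElem rest

def parse_elem_nodes_py_alt (lines : List String) : List (Int × List Int) :=
  (pB_go PySem.Dict.empty false lines).items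

-- ===== PRECONDITION & SPEC =====
def Spec_parse_elem_nodes_py (lines : List String) (out : List (Int × List Int)) : Prop := out = parse_elem_nodes_py_alt lines
instance (lines : List String) (out : List (Int × List Int)) : Decidable (Spec_parse_elem_nodes_py lines out) := by unfold Spec_parse_elem_nodes_py; infer_instance

-- ===== CLAIM (what is proved, stated in full; the proofs are below) =====
def Claim_equal_parse_elem_nodes_py : Prop := ∀ (lines : List String), Dom_parse_elem_nodes_py lines → Spec_parse_elem_nodes_py lines (parse_elem_nodes_py lines)

-- ===== LEMMAS AND PROOFS =====

-- a string whose upper-case form starts with "*ELEMENT" starts with "*"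
theorem startswith_star_of_upper (s : String)
    (h : PySem.Str.startswith (PySem.Str.upper s) "*ELEMENT" = true) :
    PySem.Str.startswith s "*" = true := by
  rw [PySem.Str.startswith_eq] at h ⊢
  rw [PySem.Chars.startswith_iff] at h ⊢
  have hl : (PySem.Str.upper s).toList = PySem.Chars.upper s.toList :=
    PySem.Str.toList_upper s
  rw [hl] at h
  cases hs : s.toList with
  | nil =>
    rw [hs] at h
    simp [PySem.Chars.upper] at h
  | cons c cs =>
    rw [hs] at h
    obtain ⟨t, ht⟩ := h
    simp only [PySem.Chars.upper, List.map_cons] at ht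
    have hc : PySem.Chars.upperChar c = '*' := by
      have := congrArg (fun l => l.head?) ht
      simpa using this.symm
    have hc' : c = '*' := by
      unfold PySem.Chars.upperChar at hc
      split at hc
      · exfalso
        rename_i hlow
        simp only [PySem.Chars.islower, Bool.and_eq_true, decide_eq_true_eq] at hlow
        have h1 : 97 ≤ c.toNat := hlow.1
        have h2 : c.toNat ≤ 122 := hlow.2
        have hv : (c.toNat - 32).isValidChar := Or.inl (by omega)
        have ht2 := Char.toNat_ofNat (c.toNat - 32)
        rw [if_pos hv] at ht2
        have := congrArg Char.toNat hc
        rw [ht2] at this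
        have : c.toNat - 32 = 42 := this
        omega
      · exact hc
    exact ⟨cs, by rw [hc']; rfl⟩

-- per-line parsing: B's early-return accumulator loop equals A's filtered mapM
theorem pB_vals_eq (parts : List String) (acc : List Int) :
    pB_vals acc parts =
      match (parts.filter (fun p => PySem.Str.strip p != "")).mapM
            (fun p => PySem.Int.ofStr? (PySem.Str.strip p)) with
      | none => []
      | some v => acc ++ v := by
  induction parts generalizing acc with
  | nil => simp [pB_vals]
  | cons p ps ih =>
    simp only [pB_vals, List.filter_cons]
    by_cases hq : PySem.Str.strip p == ""
    · have : (PySem.Str.strip p != "") = false := by simp_all [bne]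
      simp only [hq, this, if_neg (Bool.false_ne_true)]
      exact ih acc
    · have hne : (PySem.Str.strip p != "") = true := by simp_all [bne]
      rw [if_neg hq, hne, if_pos rfl]
      cases hof : PySem.Int.ofStr? (PySem.Str.strip p) with
      | none => simp [List.mapM_cons, hof]
      | some n =>
        dsimp only
        rw [ih (acc ++ [n])]
        simp only [List.mapM_cons, hof]
        cases (ps.filter (fun p => PySem.Str.strip p != "")).mapM
              (fun p => PySem.Int.ofStr? (PySem.Str.strip p)) with
        | none => rfl
        | some v => simp

theorem line_eq (d : PySem.Dict Int (List Int)) (l : String) :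
    pA_line d l = pB_line d (PySem.Str.strip l) := by
  unfold pA_line pB_line
  rw [pB_vals_eq]
  dsimp only
  cases h : (((pvSplitComma (pvRstripComma (PySem.Str.strip l)))).filter
      (fun p => PySem.Str.strip p != "")).mapM
      (fun p => PySem.Int.ofStr? (PySem.Str.strip p)) with
  | none => rfl
  | some v => cases v <;> simp

-- the two traversals agree, both outside (P) and inside (Q) an *ELEMENT block
theorem go_eq (ls : List String) :
    (∀ d, pA_go d ls = pB_go d false ls) ∧
    (∀ d, pA_go (pA_inner d ls).1 (pA_inner d ls).2 = pB_go d true ls) := by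
  induction ls with
  | nil => constructor <;> intro d <;> simp [pA_go, pA_inner, pB_go]
  | cons l rest ih =>
    obtain ⟨ihP, ihQ⟩ := ih
    constructor
    · intro d
      rw [pA_go, pB_go]
      by_cases hh : PySem.Str.startswith (PySem.Str.upper (PySem.Str.strip l)) "*ELEMENT" = true
      · rw [if_pos hh, if_pos hh]
        exact ihQ d
      · rw [if_neg hh, if_neg hh]
        split
        · exact ihP d
        · exact ihP d
    · intro d
      rw [pB_go]
      by_cases hstar : PySem.Str.startswith (PySem.Str.strip l) "*" = true
      · rw [pA_inner, if_pos hstar, pA_go]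
        by_cases hh : PySem.Str.startswith (PySem.Str.upper (PySem.Str.strip l)) "*ELEMENT" = true
        · rw [if_pos hh, if_pos hh]
          exact ihQ d
        · rw [if_neg hh, if_neg hh, if_pos hstar]
          exact ihP d
      · have hh : ¬ PySem.Str.startswith (PySem.Str.upper (PySem.Str.strip l)) "*ELEMENT" = true := by
          intro h; exact hstar (startswith_star_of_upper _ h)
        rw [pA_inner, if_neg hstar, if_neg hh, if_neg hstar]
        rw [if_pos rfl, ← line_eq d l]
        exact ihQ (pA_line d l)

-- ===== VERDICT (by name: the statement is the Claim_ definition above) =====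
theorem parse_elem_nodes_py_spec : Claim_equal_parse_elem_nodes_py := by
  intro lines _
  unfold Spec_parse_elem_nodes_py parse_elem_nodes_py parse_elem_nodes_py_alt
  rw [(go_eq lines).1 PySem.Dict.empty]
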